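-- pv_equiv track=rewrite | github.com/TrueLearnAI/truelearn | truelearn_experiments/data_analysis/generate_most_active_user_analytics.py | compute_num_users
-- ===== SOURCE A (Python) =====
-- def compute_num_users(actuals, max_events, window=10):
--     num_users = []
--
--     for num in range(1, max_events):
--         num_events = num * window
--         usr_cnt = 0
--
--         for user, actual in actuals.items():
--             if len(actual) < num_events:
--                 continue
--
--             usr_cnt += 1
--
--         num_users.append(
--             {
--                 "num_events": num_events,
--                 "Number of Learners": usr_cnt
--             })
--
--         if num_events >= max_events:
--             break
--
--     return num_users
-- ===== SOURCE B (Python) =====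
-- def compute_num_users(actuals, max_events, window=10):
--     if max_events <= 1:
--         return []
--     last = max_events - 1
--     if window > 0:
--         q = -(-max_events // window)  # first threshold index reaching max_events
--         if q < last:
--             last = q
--     # bucket each user by the number of thresholds it clears, then suffix-sum
--     hist = {}
--     for actual in actuals.values():
--         b = min(len(actual) // window, last) if window > 0 else last
--         hist[b] = hist.get(b, 0) + 1
--     counts = []
--     running = 0
--     for k in range(last, 0, -1):
--         running += hist.get(k, 0)
--         counts.append(running)
--     counts.reverse()
--     return list(
--         {"num_events": k * window, "Number of Learners": c}
--         for k, c in enumerate(counts, 1)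
--     )
-- ===== Notes on version B (the rewrite author's own statement) =====
-- stated objective: alternative
-- what changed: Instead of rescanning every user once per threshold, B makes one pass bucketing each user by how many thresholds its event count clears (len // window, capped) into a dict histogram, then derives the per-threshold counts as suffix sums of that histogram built back-to-front and reversed.
import Mathlib
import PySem

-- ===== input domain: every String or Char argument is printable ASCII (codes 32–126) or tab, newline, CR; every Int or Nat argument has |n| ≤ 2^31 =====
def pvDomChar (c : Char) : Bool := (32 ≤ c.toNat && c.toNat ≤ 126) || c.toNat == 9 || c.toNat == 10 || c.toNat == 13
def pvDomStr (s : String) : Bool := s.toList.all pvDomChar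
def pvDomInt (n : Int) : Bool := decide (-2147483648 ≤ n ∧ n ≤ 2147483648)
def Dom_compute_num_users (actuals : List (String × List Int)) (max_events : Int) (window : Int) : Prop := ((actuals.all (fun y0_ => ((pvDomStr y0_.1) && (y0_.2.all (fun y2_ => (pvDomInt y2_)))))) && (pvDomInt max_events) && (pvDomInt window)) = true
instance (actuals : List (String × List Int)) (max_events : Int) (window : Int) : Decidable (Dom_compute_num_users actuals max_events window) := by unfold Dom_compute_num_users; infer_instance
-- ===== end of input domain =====

-- B replaces A's per-threshold rescan of all users by a one-pass bucket histogram
-- (how many thresholds each user clears) plus a suffix-sum sweep over the buckets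
-- (a different algorithm; a timing run did not measure B as faster).

-- ===== PORT A =====
-- 'for num in range(1, max_events): … if num_events >= max_events: break' as fuel
-- recursion with fuel = (max_events - 1).toNat; the inner user loop is a foldl.
def pvLoopA (items : List (String × List Int)) (max_events window : Int) :
    Nat → Int → List (List (String × Int))
  | 0, _ => []
  | fuel + 1, num =>
    let num_events := num * window
    let usr_cnt : Int :=
      items.foldl (fun c p => if (p.2.length : Int) < num_events then c else c + 1) 0
    let entry : List (String × Int) :=
      [("num_events", num_events), ("Number of Learners", usr_cnt)]
    if num_events ≥ max_events then [entry]
    else entry :: pvLoopA items max_events window fuel (num + 1)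

def compute_num_users (actuals : List (String × List Int)) (max_events : Int) (window : Int) : List (List (String × Int)) :=
  pvLoopA (PySem.Dict.ofList actuals).items max_events window (max_events - 1).toNat 1

-- ===== PORT B =====
-- Source B's bucket index: min(len(actual) // window, last) if window > 0 else last.
def pvBucket (window last : Int) (actual : List Int) : Int :=
  if 0 < window then min (PySem.Int.floordiv (actual.length : Int) window) last else last

-- Source B's 'for k in range(last, 0, -1)' suffix-sum loop building 'counts'; fuel counts
-- k down, the emitted list is in python's append order (k = last first) and is
-- reversed by the caller.
def pvCounts (hist : PySem.Dict Int Int) : Nat → Int → List Int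
  | 0, _ => []
  | k + 1, running =>
    let r := running + hist.getD ((k : Int) + 1) 0
    r :: pvCounts hist k r

def compute_num_users_alt (actuals : List (String × List Int)) (max_events : Int) (window : Int) : List (List (String × Int)) :=
  if max_events ≤ 1 then []
  else
    let d := PySem.Dict.ofList actuals
    let q := -(PySem.Int.floordiv (-max_events) window)
    let last := if 0 < window then (if q < max_events - 1 then q else max_events - 1)
      else max_events - 1
    let hist := d.values.foldl
      (fun h a => h.insert (pvBucket window last a) (h.getD (pvBucket window last a) 0 + 1))
      (PySem.Dict.empty : PySem.Dict Int Int)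
    let counts := (pvCounts hist last.toNat 0).reverse
    (PySem.List.enumerate counts 1).map
      (fun p => [("num_events", p.1 * window), ("Number of Learners", p.2)])

-- ===== PRECONDITION & SPEC =====
def Spec_compute_num_users (actuals : List (String × List Int)) (max_events : Int) (window : Int) (out : List (List (String × Int))) : Prop := out = compute_num_users_alt actuals max_events window
instance (actuals : List (String × List Int)) (max_events : Int) (window : Int) (out : List (List (String × Int))) : Decidable (Spec_compute_num_users actuals max_events window out) := by unfold Spec_compute_num_users; infer_instance

-- ===== CLAIM (what is proved, stated in full; the proofs are below) =====
def Claim_equal_compute_num_users : Prop := ∀ (actuals : List (String × List Int)) (max_events : Int) (window : Int), Dom_compute_num_users actuals max_events window → Spec_compute_num_users actuals max_events window (compute_num_users actuals max_events window)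

-- ===== LEMMAS AND PROOFS =====

-- A's entry at threshold index k.
def pvEntryA (items : List (String × List Int)) (window k : Int) : List (String × Int) :=
  [("num_events", k * window),
   ("Number of Learners", (items.countP (fun p => !decide ((p.2.length : Int) < k * window)) : Int))]

-- A's inner user loop counts the users with length ≥ threshold.
theorem pvFoldCount (items : List (String × List Int)) (t : Int) : ∀ (c : Int),
    items.foldl (fun c p => if (p.2.length : Int) < t then c else c + 1) c
      = c + (items.countP (fun p => !decide ((p.2.length : Int) < t)) : Int) := by
  induction items with
  | nil => intro c; simp
  | cons p rest ih =>
    intro c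
    by_cases h : (p.2.length : Int) < t
    · simp [h, ih]
    · simp [h, ih]; ring

-- A's loop for a positive window: it emits entries for k = num .. min(num+fuel-1, q),
-- q being the first index whose threshold reaches max_events.
theorem pvLoopA_char_pos (items : List (String × List Int)) (me w q : Int) (hw : 0 < w)
    (hq1 : (q - 1) * w < me) (hq2 : me ≤ q * w) :
    ∀ (fuel : Nat) (num : Int), num ≤ q →
      pvLoopA items me w fuel num
        = (PySem.List.pyRange num (min (num + fuel) (q + 1)) 1).map (pvEntryA items w) := by
  intro fuel
  induction fuel with
  | zero =>
    intro num _
    rw [PySem.List.pyRange_one_eq_nil (by omega)]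
    rfl
  | succ fuel ih =>
    intro num hnum
    simp only [pvLoopA, pvFoldCount, zero_add]
    by_cases hbr : num * w ≥ me
    · have hnq : num = q := by
        rcases lt_or_eq_of_le hnum with h | h
        · exfalso; nlinarith
        · exact h
      rw [if_pos hbr]
      rw [show min (num + ((fuel + 1 : Nat) : Int)) (q + 1) = num + 1 by omega]
      rw [PySem.List.pyRange_one_singleton]
      simp [pvEntryA]
    · have hlt : num < q := by
        rcases lt_or_eq_of_le hnum with h | h
        · exact h
        · exact absurd (h ▸ hq2) hbr
      rw [if_neg hbr]
      rw [PySem.List.pyRange_one_cons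
        (show num < min (num + ((fuel + 1 : Nat) : Int)) (q + 1) by omega)]
      rw [List.map_cons]
      rw [ih (num + 1) (by omega)]
      rw [show min (num + 1 + (fuel : Int)) (q + 1)
            = min (num + ((fuel + 1 : Nat) : Int)) (q + 1) by omega]
      rfl

-- A's loop for a nonpositive window (thresholds never reach max_events ≥ 1):
-- every user qualifies and the loop runs to fuel exhaustion.
theorem pvLoopA_char_nonpos (items : List (String × List Int)) (me w : Int) (hw : w ≤ 0)
    (hme : 1 ≤ me) :
    ∀ (fuel : Nat) (num : Int), 1 ≤ num →
      pvLoopA items me w fuel num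
        = (PySem.List.pyRange num (num + fuel) 1).map
            (fun k => [("num_events", k * w), ("Number of Learners", (items.length : Int))]) := by
  intro fuel
  induction fuel with
  | zero =>
    intro num _
    rw [PySem.List.pyRange_one_eq_nil (by omega)]
    rfl
  | succ fuel ih =>
    intro num hnum
    have ht : num * w ≤ 0 := mul_nonpos_of_nonneg_of_nonpos (by omega) hw
    have hbr : ¬ num * w ≥ me := by omega
    simp only [pvLoopA, pvFoldCount, zero_add, if_neg hbr]
    rw [List.countP_eq_length.mpr (fun p _ => by
      have h0 : (0 : Int) ≤ (p.2.length : Int) := by positivity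
      simp
      omega)]
    rw [PySem.List.pyRange_one_cons
      (show num < num + ((fuel + 1 : Nat) : Int) by omega)]
    rw [List.map_cons]
    rw [ih (num + 1) (by omega)]
    rw [show num + 1 + (fuel : Int) = num + ((fuel + 1 : Nat) : Int) by omega]

-- the reversed sweep lists, at position k = 1..n, the value r + Σ_{j=k..n} hist[j].
theorem pvCounts_reverse (hist : PySem.Dict Int Int) :
    ∀ (n : Nat) (r : Int),
      (pvCounts hist n r).reverse
        = (PySem.List.pyRange 1 ((n : Int) + 1) 1).map (fun k =>
            r + ((PySem.List.pyRange k ((n : Int) + 1) 1).map (fun j => hist.getD j 0)).sum) := by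
  intro n
  induction n with
  | zero =>
    intro r
    rw [show ((0 : Nat) : Int) + 1 = 1 by norm_num]
    rw [PySem.List.pyRange_one_eq_nil le_rfl]
    rfl
  | succ n ih =>
    intro r
    simp only [pvCounts, List.reverse_cons]
    rw [ih]
    rw [show (((n + 1 : Nat)) : Int) + 1 = ((n : Int) + 1) + 1 by push_cast; ring]
    conv_rhs => rw [PySem.List.pyRange_one_succ_right (by omega)]
    rw [List.map_append]
    congr 1
    · apply List.map_congr_left
      intro k hk
      rw [PySem.List.mem_pyRange_one] at hk
      rw [PySem.List.pyRange_one_succ_right (show k ≤ (n : Int) + 1 by omega)]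
      simp only [List.map_append, List.sum_append, List.map_cons, List.map_nil,
        List.sum_cons, List.sum_nil]
      ring
    · simp only [List.map_cons, List.map_nil]
      rw [PySem.List.pyRange_one_singleton]
      simp only [List.map_cons, List.map_nil, List.sum_cons, List.sum_nil]
      ring_nf

-- enumerating a map over range(a, a+n) with start a pairs each value with itself.
theorem pvEnumMap {α : Type} (f : Int → α) :
    ∀ (n : Nat) (a : Int),
      PySem.List.enumerate ((PySem.List.pyRange a (a + n) 1).map f) a
        = (PySem.List.pyRange a (a + n) 1).map (fun k => (k, f k)) := by
  intro n
  induction n with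
  | zero =>
    intro a
    rw [show a + ((0 : Nat) : Int) = a by norm_num]
    rw [PySem.List.pyRange_one_eq_nil le_rfl]
    rfl
  | succ n ih =>
    intro a
    rw [PySem.List.pyRange_one_cons (show a < a + ((n + 1 : Nat) : Int) by push_cast; omega)]
    simp only [List.map_cons, PySem.List.enumerate_cons]
    rw [show a + ((n + 1 : Nat) : Int) = (a + 1) + ((n : Nat) : Int) by push_cast; ring]
    rw [ih (a + 1)]

-- a suffix sum of per-bucket counts is the count of elements with bucket ≥ k.
theorem pvSumCount (ks : List Int) : ∀ (k n : Int), (∀ x ∈ ks, x ≤ n) →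
    ((PySem.List.pyRange k (n + 1) 1).map (fun j => (ks.count j : Int))).sum
      = (ks.countP (fun x => decide (k ≤ x)) : Int) := by
  induction ks with
  | nil => intro k n _; simp
  | cons a t ih =>
    intro k n hle
    have han : a ≤ n := hle a (by simp)
    have ht : ∀ x ∈ t, x ≤ n := fun x hx => hle x (by simp [hx])
    have hcount : ∀ j : Int, ((a :: t).count j : Int)
        = (t.count j : Int) + (if (j == a) = true then 1 else 0) := by
      intro j
      by_cases h : j = a
      · subst h; simp
      · simp [h, Ne.symm h]
    calc ((PySem.List.pyRange k (n + 1) 1).map (fun j => ((a :: t).count j : Int))).sum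
        = ((PySem.List.pyRange k (n + 1) 1).map
            (fun j => (t.count j : Int) + (if (j == a) = true then 1 else 0))).sum := by
          exact congrArg _ (List.map_congr_left (fun j _ => hcount j))
      _ = ((PySem.List.pyRange k (n + 1) 1).map (fun j => (t.count j : Int))).sum
            + ((PySem.List.pyRange k (n + 1) 1).map (fun j => if (j == a) = true then 1 else 0)).sum := by
          rw [← List.sum_map_add]
      _ = (t.countP (fun x => decide (k ≤ x)) : Int)
            + ((PySem.List.pyRange k (n + 1) 1).map (fun j => if (j == a) = true then 1 else 0)).sum := by
          rw [ih k n ht]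
      _ = ((a :: t).countP (fun x => decide (k ≤ x)) : Int) := by
          rw [PySem.List.sum_map_ite_one_zero (fun j => j == a)]
          rw [← List.count_eq_countP]
          by_cases hka : k ≤ a
          · have hmem : a ∈ PySem.List.pyRange k (n + 1) 1 :=
              PySem.List.mem_pyRange_one.mpr ⟨hka, by omega⟩
            rw [List.count_eq_one_of_mem (PySem.List.nodup_pyRange_one k (n + 1)) hmem]
            simp [hka]
          · have hmem : a ∉ PySem.List.pyRange k (n + 1) 1 := by
              intro h
              exact hka (PySem.List.mem_pyRange_one.mp h).1
            rw [List.count_eq_zero_of_not_mem hmem]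
            simp [hka]

-- ===== VERDICT (by name: the statement is the Claim_ definition above) =====
theorem compute_num_users_spec : Claim_equal_compute_num_users := by
  intro actuals me w _
  unfold Spec_compute_num_users compute_num_users compute_num_users_alt
  set items := (PySem.Dict.ofList actuals).items with hitems
  by_cases h1 : me ≤ 1
  · simp [h1, show (me - 1).toNat = 0 by omega, pvLoopA]
  · simp only [h1, if_false]
    set vals := (PySem.Dict.ofList actuals).values with hvals
    set q := -(PySem.Int.floordiv (-me) w) with hqdef
    set last := if 0 < w then (if q < me - 1 then q else me - 1) else me - 1 with hlast
    have hqb : 0 < w → (q - 1) * w < me ∧ me ≤ q * w := fun hw =>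
      (PySem.Int.neg_floordiv_neg_eq_iff_of_pos (a := me) (b := w) hw).mp hqdef.symm
    have hlast1 : 1 ≤ last := by
      rw [hlast]
      split_ifs with hw h2
      · rcases hqb hw with ⟨ha, hb⟩; nlinarith
      · omega
      · omega
    have hhist : ∀ j : Int,
        (vals.foldl (fun h a =>
            h.insert (pvBucket w last a) (h.getD (pvBucket w last a) 0 + 1))
            (PySem.Dict.empty : PySem.Dict Int Int)).getD j 0
          = ((vals.map (pvBucket w last)).count j : Int) := by
      intro j
      have hfold : vals.foldl
            (fun h a => h.insert (pvBucket w last a) (h.getD (pvBucket w last a) 0 + 1))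
            (PySem.Dict.empty : PySem.Dict Int Int)
          = (vals.map (pvBucket w last)).foldl
              (fun h x => h.insert x (h.getD x 0 + 1)) (PySem.Dict.empty : PySem.Dict Int Int) := by
        rw [List.foldl_map]
      rw [hfold, PySem.Dict.getD_foldl_insert_add_one]
      simp
    have hble : ∀ x ∈ vals.map (pvBucket w last), x ≤ last := by
      intro x hx
      rcases List.mem_map.mp hx with ⟨a, _, rfl⟩
      unfold pvBucket
      split_ifs
      · exact min_le_right _ _
      · exact le_refl _
    rw [pvCounts_reverse]
    rw [show ((last.toNat : Int) + 1) = last + 1 by omega]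
    rw [show (last + 1) = 1 + ((last.toNat : Nat) : Int) by omega]
    rw [pvEnumMap]
    rw [List.map_map]
    rw [show (1 : Int) + ((last.toNat : Nat) : Int) = last + 1 by omega]
    by_cases hw : 0 < w
    · -- positive window: A's rescan loop emits thresholds 1 .. last
      rcases hqb hw with ⟨hql, hqr⟩
      have hq1 : 1 ≤ q := by nlinarith
      have hlastv : last = if q < me - 1 then q else me - 1 := by rw [hlast, if_pos hw]
      rw [pvLoopA_char_pos items me w q hw hql hqr (me - 1).toNat 1 hq1]
      rw [show min (1 + ((me - 1).toNat : Int)) (q + 1) = last + 1 by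
        rw [hlastv]; split_ifs <;> omega]
      apply List.map_congr_left
      intro k hk
      rw [PySem.List.mem_pyRange_one] at hk
      have hkl : k ≤ last := by omega
      simp only [Function.comp_apply]
      unfold pvEntryA
      rw [congrArg List.sum (List.map_congr_left (fun j _ => hhist j))]
      rw [pvSumCount (vals.map (pvBucket w last)) k last hble]
      rw [List.countP_map]
      have hvals_items : vals = items.map (·.2) := by rw [hvals, hitems]; rfl
      rw [hvals_items, List.countP_map]
      rw [zero_add]
      have hpred : items.countP (fun p => !decide ((p.2.length : Int) < k * w))
          = items.countP (((fun x => decide (k ≤ x)) ∘ pvBucket w last) ∘ (fun x => x.2)) := by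
        apply List.countP_congr
        intro p _
        simp only [Function.comp_apply, pvBucket, if_pos hw, ← decide_not, le_min_iff, not_lt,
          decide_eq_true_eq]
        rw [PySem.Int.le_floordiv_iff_mul_le hw]
        omega
      rw [hpred]
    · -- nonpositive window: every user's bucket is 'last', every count is the user count
      have hlastv : last = me - 1 := by rw [hlast, if_neg hw]
      rw [pvLoopA_char_nonpos items me w (by omega) (by omega) (me - 1).toNat 1 (by omega)]
      rw [show (1 : Int) + ((me - 1).toNat : Int) = last + 1 by omega]
      apply List.map_congr_left
      intro k hk
      rw [PySem.List.mem_pyRange_one] at hk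
      simp only [Function.comp_apply]
      rw [congrArg List.sum (List.map_congr_left (fun j _ => hhist j))]
      rw [pvSumCount (vals.map (pvBucket w last)) k last hble]
      rw [List.countP_map]
      rw [List.countP_eq_length.mpr (fun a _ => by
        simp only [Function.comp_apply, pvBucket, if_neg hw, decide_eq_true_eq]
        omega)]
      have hlen : vals.length = items.length := by
        rw [hvals, hitems]; exact List.length_map _
      rw [hlen, zero_add]
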